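-- pv_equiv track=rewrite | github.com/wangzizhe/GateForge | gateforge/agent_modelica_strategy_memory_granularity_v0_33_8.py | _derive_decision
-- ===== SOURCE A (Python) =====
-- from typing import Any
--
-- def _derive_decision(rows: list[dict[str, Any]]) -> str:
--     sem19 = [row for row in rows if row["case_id"] == "sem_19_arrayed_shared_probe_bus"]
--     specific_pass = sum(1 for row in sem19 if row["granularity"] == "semantic_specific_strategy_source" and row["final_verdict"] == "PASS")
--     generic_pass = sum(1 for row in sem19 if row["granularity"] == "generic_strategy_cards" and row["final_verdict"] == "PASS")
--     broad_pass = sum(1 for row in sem19 if row["granularity"] in {"broad_strategy_note", "worked_strategy_note"} and row["final_verdict"] == "PASS")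
--     if specific_pass >= 2 and not generic_pass and not broad_pass:
--         return "semantic_memory_needs_boundary_specific_granularity"
--     if specific_pass or generic_pass or broad_pass:
--         return "strategy_memory_granularity_has_partial_signal"
--     return "strategy_memory_granularity_inconclusive"
-- ===== SOURCE B (Python) =====
-- from typing import Any
--
-- def _derive_decision(rows: list[dict[str, Any]]) -> str:
--     specific_pass = 0
--     generic_pass = 0
--     broad_pass = 0
--     for row in rows:
--         if row["case_id"] != "sem_19_arrayed_shared_probe_bus":
--             continue
--         g = row["granularity"]
--         if g == "semantic_specific_strategy_source":
--             if row["final_verdict"] == "PASS":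
--                 specific_pass += 1
--         elif g == "generic_strategy_cards":
--             if row["final_verdict"] == "PASS":
--                 generic_pass += 1
--         elif g == "broad_strategy_note" or g == "worked_strategy_note":
--             if row["final_verdict"] == "PASS":
--                 broad_pass += 1
--     if specific_pass >= 2 and not generic_pass and not broad_pass:
--         return "semantic_memory_needs_boundary_specific_granularity"
--     if specific_pass or generic_pass or broad_pass:
--         return "strategy_memory_granularity_has_partial_signal"
--     return "strategy_memory_granularity_inconclusive"
-- ===== Notes on version B (the rewrite author's own statement) =====
-- stated objective: simpler
-- what changed: Replaces the filtered intermediate list plus three separate sum-comprehension passes with a single loop over the rows that maintains three counters via an if/elif granularity branch, keeping the final decision ladder.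
import Mathlib
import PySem

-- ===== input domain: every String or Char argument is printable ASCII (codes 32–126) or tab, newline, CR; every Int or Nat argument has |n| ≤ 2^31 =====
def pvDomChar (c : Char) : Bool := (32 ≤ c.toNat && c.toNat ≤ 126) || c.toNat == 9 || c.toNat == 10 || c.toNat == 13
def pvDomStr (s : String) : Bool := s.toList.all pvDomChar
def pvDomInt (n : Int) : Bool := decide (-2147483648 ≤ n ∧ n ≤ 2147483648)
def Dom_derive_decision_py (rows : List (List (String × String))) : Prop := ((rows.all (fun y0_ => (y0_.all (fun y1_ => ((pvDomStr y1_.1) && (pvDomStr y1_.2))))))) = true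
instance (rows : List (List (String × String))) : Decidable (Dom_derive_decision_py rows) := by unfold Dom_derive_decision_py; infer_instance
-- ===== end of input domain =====

-- B replaces A's filtered list + three sum-comprehension passes by a single loop with three
-- counters (simpler, one pass); return values are equal on all inputs where A returns.

-- row[k] for a dict row: first match in the association list ("" default; Pre_ guarantees presence
-- wherever the Python actually reads a key, so KeyError never fires inside Pre_)
def pvGetKey (row : List (String × String)) (k : String) : String :=
  (List.lookup k row).getD ""

def pvHasKey (row : List (String × String)) (k : String) : Bool :=
  (List.lookup k row).isSome

-- ===== PORT A =====
-- sum(1 for row in l if cond) ported as a foldl accumulating a Nat count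
def pvSumIf (l : List (List (String × String))) (cond : List (String × String) → Bool) : Nat :=
  l.foldl (fun acc row => if cond row then acc + 1 else acc) 0

def derive_decision_py (rows : List (List (String × String))) : String :=
  let sem19 := rows.filter (fun row => pvGetKey row "case_id" == "sem_19_arrayed_shared_probe_bus")
  let specific_pass := pvSumIf sem19 (fun row =>
    pvGetKey row "granularity" == "semantic_specific_strategy_source" && pvGetKey row "final_verdict" == "PASS")
  let generic_pass := pvSumIf sem19 (fun row =>
    pvGetKey row "granularity" == "generic_strategy_cards" && pvGetKey row "final_verdict" == "PASS")
  let broad_pass := pvSumIf sem19 (fun row =>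
    (pvGetKey row "granularity" == "broad_strategy_note" || pvGetKey row "granularity" == "worked_strategy_note")
      && pvGetKey row "final_verdict" == "PASS")
  if specific_pass ≥ 2 && generic_pass == 0 && broad_pass == 0 then
    "semantic_memory_needs_boundary_specific_granularity"
  else if specific_pass != 0 || generic_pass != 0 || broad_pass != 0 then
    "strategy_memory_granularity_has_partial_signal"
  else
    "strategy_memory_granularity_inconclusive"

-- ===== PORT B =====
-- the single loop of Source B: three counters threaded through one traversal of rows
def altLoop : List (List (String × String)) → Nat → Nat → Nat → Nat × Nat × Nat
  | [], s, g, b => (s, g, b)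
  | row :: rest, s, g, b =>
    if pvGetKey row "case_id" != "sem_19_arrayed_shared_probe_bus" then
      altLoop rest s g b
    else
      let gr := pvGetKey row "granularity"
      if gr == "semantic_specific_strategy_source" then
        if pvGetKey row "final_verdict" == "PASS" then altLoop rest (s + 1) g b else altLoop rest s g b
      else if gr == "generic_strategy_cards" then
        if pvGetKey row "final_verdict" == "PASS" then altLoop rest s (g + 1) b else altLoop rest s g b
      else if gr == "broad_strategy_note" || gr == "worked_strategy_note" then
        if pvGetKey row "final_verdict" == "PASS" then altLoop rest s g (b + 1) else altLoop rest s g b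
      else altLoop rest s g b

def derive_decision_py_alt (rows : List (List (String × String))) : String :=
  let c := altLoop rows 0 0 0
  if c.1 ≥ 2 && c.2.1 == 0 && c.2.2 == 0 then
    "semantic_memory_needs_boundary_specific_granularity"
  else if c.1 != 0 || c.2.1 != 0 || c.2.2 != 0 then
    "strategy_memory_granularity_has_partial_signal"
  else
    "strategy_memory_granularity_inconclusive"

-- ===== PRECONDITION & SPEC =====
-- Pre_ excludes exactly the inputs where Python A raises KeyError: a row missing "case_id", a
-- sem_19 row missing "granularity", or a sem_19 row with a categorized granularity missing
-- "final_verdict".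
def Pre_derive_decision_py (rows : List (List (String × String))) : Prop :=
  (rows.all (fun row =>
    pvHasKey row "case_id" &&
    (pvGetKey row "case_id" != "sem_19_arrayed_shared_probe_bus" ||
      (pvHasKey row "granularity" &&
        (!(pvGetKey row "granularity" == "semantic_specific_strategy_source" ||
           pvGetKey row "granularity" == "generic_strategy_cards" ||
           pvGetKey row "granularity" == "broad_strategy_note" ||
           pvGetKey row "granularity" == "worked_strategy_note") ||
         pvHasKey row "final_verdict"))))) = true
instance (rows : List (List (String × String))) : Decidable (Pre_derive_decision_py rows) := by
  unfold Pre_derive_decision_py; infer_instance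

def pvWitness_derive_decision_py : (List (List (String × String))) :=
  [[("case_id", "sem_19_arrayed_shared_probe_bus"), ("granularity", "semantic_specific_strategy_source"), ("final_verdict", "PASS")],
   [("case_id", "other")]]

def Spec_derive_decision_py (rows : List (List (String × String))) (out : String) : Prop := out = derive_decision_py_alt rows
instance (rows : List (List (String × String))) (out : String) : Decidable (Spec_derive_decision_py rows out) := by unfold Spec_derive_decision_py; infer_instance

-- ===== CLAIM (what is proved, stated in full; the proofs are below) =====
def Claim_equal_derive_decision_py : Prop := ∀ (rows : List (List (String × String))), Dom_derive_decision_py rows → Pre_derive_decision_py rows → Spec_derive_decision_py rows (derive_decision_py rows)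

-- ===== LEMMAS AND PROOFS =====

theorem pvSumIf_eq_countP (cond : List (String × String) → Bool)
    (l : List (List (String × String))) :
    pvSumIf l cond = l.countP cond := by
  unfold pvSumIf
  suffices h : ∀ (l : List (List (String × String))) (n : Nat),
      l.foldl (fun acc row => if cond row then acc + 1 else acc) n = n + l.countP cond by
    simpa using h l 0
  intro l
  induction l with
  | nil => simp [List.countP_nil]
  | cons x xs ih =>
    intro n
    simp only [List.foldl_cons, List.countP_cons, ih]
    split <;> omega

theorem altLoop_eq (rows : List (List (String × String))) :
    ∀ (s g b : Nat), altLoop rows s g b =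
      (s + rows.countP (fun row =>
          (pvGetKey row "granularity" == "semantic_specific_strategy_source" && pvGetKey row "final_verdict" == "PASS") &&
          pvGetKey row "case_id" == "sem_19_arrayed_shared_probe_bus"),
       g + rows.countP (fun row =>
          (pvGetKey row "granularity" == "generic_strategy_cards" && pvGetKey row "final_verdict" == "PASS") &&
          pvGetKey row "case_id" == "sem_19_arrayed_shared_probe_bus"),
       b + rows.countP (fun row =>
          ((pvGetKey row "granularity" == "broad_strategy_note" || pvGetKey row "granularity" == "worked_strategy_note")
            && pvGetKey row "final_verdict" == "PASS") &&
          pvGetKey row "case_id" == "sem_19_arrayed_shared_probe_bus")) := by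
  induction rows with
  | nil => intro s g b; simp [altLoop, List.countP_nil]
  | cons row rest ih =>
    intro s g b
    simp only [altLoop, List.countP_cons]
    by_cases hc : pvGetKey row "case_id" == "sem_19_arrayed_shared_probe_bus"
    · simp only [hc]
      by_cases h1 : pvGetKey row "granularity" == "semantic_specific_strategy_source"
      · by_cases hv : pvGetKey row "final_verdict" == "PASS" <;>
          simp_all [ih] <;> omega
      · by_cases h2 : pvGetKey row "granularity" == "generic_strategy_cards"
        · by_cases hv : pvGetKey row "final_verdict" == "PASS" <;>
            simp_all [ih] <;> omega
        · by_cases h3 : (pvGetKey row "granularity" == "broad_strategy_note" ||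
              pvGetKey row "granularity" == "worked_strategy_note")
          · by_cases hv : pvGetKey row "final_verdict" == "PASS" <;>
              simp_all [ih] <;> omega
          · simp_all [ih]
    · have hb : (pvGetKey row "case_id" != "sem_19_arrayed_shared_probe_bus") = true := by
        simpa [bne] using hc
      simp_all [ih]

-- ===== VERDICT (by name: the statement is the Claim_ definition above) =====
theorem derive_decision_py_spec : Claim_equal_derive_decision_py := by
  intro rows _ _
  unfold Spec_derive_decision_py derive_decision_py derive_decision_py_alt
  rw [altLoop_eq]
  simp only [pvSumIf_eq_countP, List.countP_filter, Nat.zero_add]
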